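-- pv_equiv track=rewrite | github.com/YukunGrantZhang/Basic-Data-Structures | VariableHashTableSearch.py | get_nearest_prime
-- ===== SOURCE A (Python) =====
-- def get_nearest_prime(old_number):
--     largest_prime = 0
--     for num in range(old_number + 1, 2 * old_number) :
--         for i in range(2,num):
--             if num % i == 0:
--                 break
--         else:
--             largest_prime = num
--     return largest_prime
-- ===== SOURCE B (Python) =====
-- def _is_prime(num):
--     if num < 2:
--         return False
--     i = 2
--     while i * i <= num:
--         if num % i == 0:
--             return False
--         i += 1
--     return True
--
-- def get_nearest_prime(old_number):
--     for num in range(2 * old_number - 1, old_number, -1):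
--         if _is_prime(num):
--             return num
--     return 0
-- ===== Notes on version B (the rewrite author's own statement) =====
-- stated objective: faster
-- what changed: B scans the interval downward and returns the first prime found (early exit), testing primality only with divisors up to sqrt(num), instead of A's full upward scan with trial division by every i < num.
import Mathlib
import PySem

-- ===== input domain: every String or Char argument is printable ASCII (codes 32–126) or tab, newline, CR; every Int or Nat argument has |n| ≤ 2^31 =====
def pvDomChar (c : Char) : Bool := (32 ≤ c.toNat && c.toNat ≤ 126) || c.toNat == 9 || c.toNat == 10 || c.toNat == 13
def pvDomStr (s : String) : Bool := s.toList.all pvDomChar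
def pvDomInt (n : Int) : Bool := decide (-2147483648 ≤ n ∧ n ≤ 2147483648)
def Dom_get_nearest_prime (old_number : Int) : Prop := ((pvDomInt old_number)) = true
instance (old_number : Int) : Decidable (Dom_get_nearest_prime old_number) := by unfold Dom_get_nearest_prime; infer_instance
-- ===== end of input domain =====

-- B scans the interval downward and returns the first prime found (early exit), testing divisors
-- only up to sqrt(num), instead of A's full upward scan with trial division by every i < num.

-- ===== PORT A =====
-- inner 'for i in range(2, num): … break / else' of A
def pvInnerA (num : Int) : List Int → Bool
  | [] => true
  | i :: rest => if PySem.Int.mod num i == 0 then false else pvInnerA num rest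

def get_nearest_prime (old_number : Int) : Int :=
  (PySem.List.pyRange (old_number + 1) (2 * old_number) 1).foldl
    (fun largest_prime num =>
      if pvInnerA num (PySem.List.pyRange 2 num 1) then num else largest_prime) 0

-- ===== PORT B =====
-- 'while i * i <= num' loop of B's _is_prime
def pvIsPrimeLoop (num i : Int) : Bool :=
  if i * i ≤ num then
    if PySem.Int.mod num i == 0 then false
    else pvIsPrimeLoop num (i + 1)
  else true
termination_by (num + 1 - i).toNat
decreasing_by
  have hi : i ≤ num := by
    by_cases h0 : i ≤ 0
    · have := mul_self_nonneg i; omega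
    · have h1 : 1 ≤ i := by omega
      nlinarith [h1]
  omega

def pvIsPrime (num : Int) : Bool :=
  if num < 2 then false else pvIsPrimeLoop num 2

-- B's descending 'for … return num' loop
def pvScanB : List Int → Int
  | [] => 0
  | num :: rest => if pvIsPrime num then num else pvScanB rest

def get_nearest_prime_alt (old_number : Int) : Int :=
  pvScanB (PySem.List.pyRange (2 * old_number - 1) old_number (-1))

-- ===== PRECONDITION & SPEC =====
def Spec_get_nearest_prime (old_number : Int) (out : Int) : Prop := out = get_nearest_prime_alt old_number
instance (old_number : Int) (out : Int) : Decidable (Spec_get_nearest_prime old_number out) := by unfold Spec_get_nearest_prime; infer_instance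

-- ===== CLAIM (what is proved, stated in full; the proofs are below) =====
def Claim_equal_get_nearest_prime : Prop := ∀ (old_number : Int), Dom_get_nearest_prime old_number → Spec_get_nearest_prime old_number (get_nearest_prime old_number)

-- ===== LEMMAS AND PROOFS =====

-- pvInnerA is 'no i in the list divides num'
theorem pvInnerA_eq_true_iff (num : Int) (l : List Int) :
    pvInnerA num l = true ↔ ∀ i ∈ l, ¬ PySem.Int.mod num i = 0 := by
  induction l with
  | nil => simp [pvInnerA]
  | cons i rest ih =>
    by_cases h : PySem.Int.mod num i = 0 <;> simp [pvInnerA, h, ih]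

-- the while loop checks all divisor candidates j ≥ i with j*j ≤ num
theorem pvIsPrimeLoop_eq_true_iff (num : Int) :
    ∀ i : Int, 2 ≤ i →
      (pvIsPrimeLoop num i = true ↔ ∀ j : Int, i ≤ j → j * j ≤ num → ¬ PySem.Int.mod num j = 0) := by
  intro i
  induction i using pvIsPrimeLoop.induct (num := num) with
  | case1 i h hm =>
    intro _
    rw [pvIsPrimeLoop, if_pos h, if_pos hm]
    simp only [Bool.false_eq_true, false_iff]
    intro H
    exact H i le_rfl h (by simpa using hm)
  | case2 i h hm ih =>
    intro hi
    rw [pvIsPrimeLoop, if_pos h, if_neg hm]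
    rw [ih (by omega)]
    constructor
    · intro H j hj hjj
      rcases eq_or_lt_of_le hj with rfl | hlt
      · simpa using hm
      · exact H j (by omega) hjj
    · intro H j hj hjj
      exact H j (by omega) hjj
  | case3 i h =>
    intro hi
    rw [pvIsPrimeLoop, if_neg h]
    simp only [true_iff]
    intro j hj hjj
    exact absurd hjj (by nlinarith)

-- trial division by all i < num agrees with trial division up to sqrt, for num ≥ 3
theorem prime_test_agree (num : Int) (h3 : 3 ≤ num) :
    pvInnerA num (PySem.List.pyRange 2 num 1) = pvIsPrime num := by
  have hlt : ¬ num < 2 := by omega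
  rw [pvIsPrime, if_neg hlt, Bool.eq_iff_iff, pvInnerA_eq_true_iff,
    pvIsPrimeLoop_eq_true_iff num 2 le_rfl]
  constructor
  · intro H j hj2 hjj
    apply H
    rw [PySem.List.mem_pyRange_one]
    exact ⟨hj2, by nlinarith⟩
  · intro H i hi
    rw [PySem.List.mem_pyRange_one] at hi
    obtain ⟨hi2, hin⟩ := hi
    intro hmod
    obtain ⟨e, he⟩ := (PySem.Int.mod_eq_zero_iff_dvd num i).mp hmod
    have hipos : 0 < i := by omega
    have hepos : 0 < e := by nlinarith
    have he2 : 2 ≤ e := by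
      by_cases he1 : e = 1
      · subst he1; omega
      · omega
    by_cases hii : i * i ≤ num
    · exact H i hi2 hii hmod
    · push Not at hii
      have hee : e * e ≤ num := by nlinarith
      exact H e he2 hee
        ((PySem.Int.mod_eq_zero_iff_dvd num e).mpr ⟨i, by linarith [mul_comm i e]⟩)

-- pvScanB is find?-with-default-0
theorem pvScanB_eq_find (l : List Int) :
    pvScanB l = (l.find? pvIsPrime).getD 0 := by
  induction l with
  | nil => simp [pvScanB]
  | cons x rest ih =>
    by_cases h : pvIsPrime x = true <;> simp [pvScanB, List.find?, h, ih]

-- A's 'keep the last satisfying element' fold is find? on the reversed list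
theorem foldl_last_eq_find_reverse (p : Int → Bool) (l : List Int) (d : Int) :
    l.foldl (fun acc x => if p x then x else acc) d = (l.reverse.find? p).getD d := by
  induction l generalizing d with
  | nil => simp
  | cons x rest ih =>
    simp only [List.foldl_cons, List.reverse_cons, List.find?_append, ih]
    cases hf : rest.reverse.find? p with
    | some y => simp
    | none =>
      by_cases h : p x = true <;> simp [List.find?, h]

-- both folds use the same predicate on the members of the range
theorem foldA_congr (old_number : Int) :
    (PySem.List.pyRange (old_number + 1) (2 * old_number) 1).foldl
      (fun largest_prime num =>
        if pvInnerA num (PySem.List.pyRange 2 num 1) then num else largest_prime) 0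
    = (PySem.List.pyRange (old_number + 1) (2 * old_number) 1).foldl
      (fun largest_prime num => if pvIsPrime num then num else largest_prime) 0 := by
  apply PySem.List.foldl_congr_mem
  intro acc num hmem
  rw [PySem.List.mem_pyRange_one] at hmem
  have h3 : 3 ≤ num := by omega
  rw [prime_test_agree num h3]

-- ===== VERDICT (by name: the statement is the Claim_ definition above) =====
theorem get_nearest_prime_spec : Claim_equal_get_nearest_prime := by
  intro old_number _
  unfold Spec_get_nearest_prime get_nearest_prime get_nearest_prime_alt
  rw [foldA_congr, foldl_last_eq_find_reverse, pvScanB_eq_find]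
  have hr : PySem.List.pyRange (2 * old_number - 1) old_number (-1)
      = (PySem.List.pyRange (old_number + 1) (2 * old_number) 1).reverse := by
    rw [PySem.List.pyRange_neg_one_eq_reverse]
    ring_nf
  rw [hr]
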